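-- pv_equiv track=rewrite | github.com/devamateur/coding-test-practice | 프로그래머스/2/138476. 귤 고르기/귤 고르기.py | solution
-- ===== SOURCE A (Python) =====
-- def solution(k, tangerine):
--     answer = 0
--
--     count_dict = {}        # 크기별 귤의 개수를 저장하는 딕셔너리
--
--     for item in tangerine:
--         if item not in count_dict:
--             count_dict[item] = 1
--         else:
--             count_dict[item] += 1
--
--     count_dict = dict(sorted(count_dict.items(), key=lambda x: x[1], reverse=True))
--
--     box = []      # 중복인 귤 중 k개를 담는 리스트
--     for t, c in count_dict.items():
--         if len(box) < k:
--             for i in range(c):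
--                 box.append(t)
--     answer = len(set(box))
--
--     return answer
-- ===== SOURCE B (Python) =====
-- def solution(k, tangerine):
--     counts = {}
--     for t in tangerine:
--         counts[t] = counts.get(t, 0) + 1
--     n = len(tangerine)
--     freq = [0] * (n + 1)          # freq[c] = how many sizes occur exactly c times
--     for c in counts.values():
--         freq[c] += 1
--     remaining = k
--     picked = 0
--     for c in range(n, 0, -1):     # counting-sort buckets, largest count first
--         if remaining > 0 and freq[c]:
--             take = min(freq[c], -(-remaining // c))   # whole bucket, or just enough
--             picked += take
--             remaining -= take * c
--     return picked
-- ===== Notes on version B (the rewrite author's own statement) =====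
-- stated objective: alternative
-- what changed: B replaces A's comparison sort of the counts, materialised box list and final set()-dedup by a counting-sort histogram freq[c] = number of sizes occurring c times, walked from the largest count down with an arithmetic per-bucket take (min(freq[c], ceil(remaining/c))), so no sort, no per-tangerine list and no dedup pass exist.
import Mathlib
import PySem

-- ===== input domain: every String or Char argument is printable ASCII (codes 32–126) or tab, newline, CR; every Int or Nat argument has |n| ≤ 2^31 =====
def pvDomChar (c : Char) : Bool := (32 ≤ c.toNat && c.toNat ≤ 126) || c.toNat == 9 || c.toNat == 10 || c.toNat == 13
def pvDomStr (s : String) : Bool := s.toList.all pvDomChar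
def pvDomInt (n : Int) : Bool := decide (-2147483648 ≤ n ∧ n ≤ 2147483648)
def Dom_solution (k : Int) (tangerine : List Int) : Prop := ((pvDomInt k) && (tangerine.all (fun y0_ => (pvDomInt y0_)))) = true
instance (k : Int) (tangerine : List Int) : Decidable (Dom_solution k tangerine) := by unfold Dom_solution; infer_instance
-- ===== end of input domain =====

-- B replaces A's comparison sort + materialised box list + set-dedup by a counting-sort
-- histogram of the counts walked largest-first with an arithmetic per-bucket take;
-- return value only, no side effects.


-- ===== PORT A =====
def solution (k : Int) (tangerine : List Int) : Int :=
  -- count_dict: for item in tangerine: if item not in count_dict: =1 else: +=1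
  let count_dict : PySem.Dict Int Int :=
    tangerine.foldl
      (fun d item =>
        if d.contains item = false then d.insert item 1
        else d.insert item (d.getD item 0 + 1))
      PySem.Dict.empty
  -- count_dict = dict(sorted(count_dict.items(), key=lambda x: x[1], reverse=True))
  let count_dict2 : PySem.Dict Int Int :=
    PySem.Dict.ofList (PySem.List.sorted count_dict.items (fun x => x.2) true)
  -- box loop: for t, c in count_dict.items(): if len(box) < k: for i in range(c): box.append(t)
  let box : List Int :=
    count_dict2.items.foldl
      (fun box tc =>
        if (box.length : Int) < k then
          (PySem.List.pyRange 0 tc.2 1).foldl (fun b _ => b ++ [tc.1]) box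
        else box)
      []
  -- answer = len(set(box))
  ((PySem.Set.ofList box).length : Int)

-- ===== PORT B =====
def solution_alt (k : Int) (tangerine : List Int) : Int :=
  -- counts[t] = counts.get(t, 0) + 1
  let counts : PySem.Dict Int Int :=
    tangerine.foldl (fun d t => d.insert t (d.getD t 0 + 1)) PySem.Dict.empty
  let n : Int := (tangerine.length : Int)
  -- freq = [0]*(n+1); for c in counts.values(): freq[c] += 1
  let freq : List Int :=
    counts.values.foldl
      (fun fr c => PySem.List.pySetD fr c (PySem.List.pyGetD fr c 0 + 1))
      (List.replicate (tangerine.length + 1) (0 : Int))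
  -- for c in range(n, 0, -1): if remaining > 0 and freq[c]: take = min(freq[c], -(-remaining//c)); …
  let st : Int × Int :=
    (PySem.List.pyRange n 0 (-1)).foldl
      (fun st c =>
        if 0 < st.1 ∧ PySem.List.pyGetD freq c 0 ≠ 0 then
          let take := min (PySem.List.pyGetD freq c 0) (-(PySem.Int.floordiv (-st.1) c))
          (st.1 - take * c, st.2 + take)
        else st)
      (k, 0)
  st.2

-- ===== PRECONDITION & SPEC =====
def Spec_solution (k : Int) (tangerine : List Int) (out : Int) : Prop := out = solution_alt k tangerine
instance (k : Int) (tangerine : List Int) (out : Int) : Decidable (Spec_solution k tangerine out) := by unfold Spec_solution; infer_instance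

-- ===== CLAIM (what is proved, stated in full; the proofs are below) =====
def Claim_equal_solution : Prop := ∀ (k : Int) (tangerine : List Int), Dom_solution k tangerine → Spec_solution k tangerine (solution k tangerine)

-- ===== LEMMAS AND PROOFS =====

-- ---------- A side: solution = greedy (total, picked) fold over the descending-sorted counts ----------

-- A's count loop and B's count loop build the same dict: when the key is absent, get(t,0)+1 = 1.
lemma count_step_eq (d : PySem.Dict Int Int) (x : Int) :
    (if d.contains x = false then d.insert x 1
     else d.insert x (d.getD x 0 + 1)) = d.insert x (d.getD x 0 + 1) := by
  by_cases h : d.contains x = false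
  · simp only [h, if_true]
    have hg : d.get? x = none := by
      have := PySem.Dict.contains_eq_isSome_get? d x
      rw [h] at this
      exact Option.not_isSome_iff_eq_none.mp (by simp [← this])
    simp [PySem.Dict.getD, hg]
  · simp [h]

lemma count_fold_eq (tangerine : List Int) :
    tangerine.foldl
      (fun d item =>
        if d.contains item = false then d.insert item 1
        else d.insert item (d.getD item 0 + 1))
      PySem.Dict.empty
    = PySem.Dict.counter tangerine := by
  rw [PySem.Dict.counter_eq_foldl]
  congr 1
  funext d x
  exact count_step_eq d x

-- stable sort commutes with mapping the key out
lemma map_insertBy {α κ : Type} (key : α → κ) (p : κ → κ → Bool) (x : α) (ys : List α) :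
    (PySem.List.insertBy (fun a b => p (key a) (key b)) x ys).map key
      = PySem.List.insertBy p (key x) (ys.map key) := by
  induction ys with
  | nil => rfl
  | cons y ys ih =>
    simp only [PySem.List.insertBy]
    by_cases h : p (key x) (key y)
    · simp [PySem.List.insertBy, h]
    · simp [PySem.List.insertBy, h, ih]

lemma sorted_rev_map_key {α κ : Type} [LinearOrder κ] (xs : List α) (key : α → κ) :
    PySem.List.sorted (xs.map key) (fun v => v) true
      = (PySem.List.sorted xs key true).map key := by
  rw [PySem.List.sorted_rev_eq_foldl_insertBy, PySem.List.sorted_rev_eq_foldl_insertBy,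
      List.foldl_map]
  have H : ∀ (l : List α) (acc : List α),
      List.foldl (fun acc x => PySem.List.insertBy (fun a b => decide (b < a)) (key x) acc)
        (acc.map key) l
      = (List.foldl (fun acc x => PySem.List.insertBy (fun a b => decide (key b < key a)) x acc)
          acc l).map key := by
    intro l
    induction l with
    | nil => intro acc; rfl
    | cons x l ih =>
      intro acc
      simp only [List.foldl_cons]
      rw [← map_insertBy key (fun a b => decide (b < a)) x acc]
      exact ih _
  simpa using H xs []

-- adding copies of an element already present changes nothing
lemma update_replicate (s : PySem.Set Int) (t : Int) (h : t ∈ s) (m : Nat) :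
    PySem.Set.update s (List.replicate m t) = s := by
  induction m generalizing s with
  | zero => rfl
  | succ m ih =>
    rw [List.replicate_succ, PySem.Set.update_cons]
    have hc : PySem.Set.add s t = s := by
      simp [PySem.Set.add, h]
    rw [hc]
    exact ih s h

lemma ofList_append_replicate (box : List Int) (t : Int) (ht : t ∉ box) (m : Nat) :
    PySem.Set.ofList (box ++ List.replicate (m + 1) t) = PySem.Set.ofList box ++ [t] := by
  rw [PySem.Set.ofList_append, List.replicate_succ, PySem.Set.update_cons]
  have hadd : PySem.Set.add (PySem.Set.ofList box) t = PySem.Set.ofList box ++ [t] := by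
    have : t ∉ PySem.Set.ofList box := by
      rw [PySem.Set.mem_ofList]; exact ht
    simp [PySem.Set.add, this]
  rw [update_replicate _ t (by rw [hadd]; simp) m, hadd]

-- the range-append inner loop appends c copies
lemma range_append_loop (box : List Int) (t c : Int) (hc : 1 ≤ c) :
    (PySem.List.pyRange 0 c 1).foldl (fun b _ => b ++ [t]) box
      = box ++ List.replicate ((c - 1).toNat + 1) t := by
  have h1 : (PySem.List.pyRange 0 c 1).foldl (fun b _ => b ++ [t]) box
      = box ++ (PySem.List.pyRange 0 c 1).map (fun _ => t) :=
    PySem.List.foldl_append_singleton_eq_map (fun _ => t) _ box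
  rw [h1]
  have h2 : (PySem.List.pyRange 0 c 1).map (fun _ => t)
      = List.replicate (PySem.List.pyRange 0 c 1).length t := List.map_const
  rw [h2, PySem.List.length_pyRange_one]
  have h3 : (c - 0).toNat = (c - 1).toNat + 1 := by omega
  rw [h3]

-- the main correspondence: A's box loop vs a (total, picked) accumulator loop
lemma loop_eq (k : Int) (ps : List (Int × Int)) (box : List Int) (st : Int × Int)
    (h1 : (box.length : Int) = st.1)
    (h2 : ((PySem.Set.ofList box).length : Int) = st.2)
    (h3 : ∀ p ∈ ps, p.1 ∉ box)
    (h4 : (ps.map Prod.fst).Nodup)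
    (h5 : ∀ p ∈ ps, 1 ≤ p.2) :
    ((PySem.Set.ofList
        (ps.foldl
          (fun box tc =>
            if (box.length : Int) < k then
              (PySem.List.pyRange 0 tc.2 1).foldl (fun b _ => b ++ [tc.1]) box
            else box)
          box)).length : Int)
      = (ps.foldl (fun st p => if st.1 < k then (st.1 + p.2, st.2 + 1) else st) st).2 := by
  induction ps generalizing box st with
  | nil => simpa using h2
  | cons q rest ih =>
    obtain ⟨t, c⟩ := q
    have hc : 1 ≤ c := h5 (t, c) (by simp)
    have htb : t ∉ box := h3 (t, c) (by simp)
    simp only [List.foldl_cons]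
    by_cases hk : (box.length : Int) < k
    · rw [if_pos hk, if_pos (by rw [← h1]; exact hk),
          range_append_loop box t c hc]
      apply ih
      · simp only [List.length_append, List.length_replicate]
        push_cast
        omega
      · rw [ofList_append_replicate box t htb]
        simp only [List.length_append, List.length_cons, List.length_nil]
        push_cast
        omega
      · intro p hp
        have h6 := h3 p (by simp [hp])
        have hne : p.1 ≠ t := by
          have := h4
          simp only [List.map_cons, List.nodup_cons] at this
          intro he
          exact this.1 (he ▸ (List.mem_map.mpr ⟨p, hp, rfl⟩))
        simp only [List.mem_append, List.mem_replicate]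
        rintro (h | ⟨-, h⟩)
        · exact h6 h
        · exact hne h
      · exact (List.nodup_cons.mp (by simpa using h4)).2
      · exact fun p hp => h5 p (by simp [hp])
    · rw [if_neg hk, if_neg (by rw [← h1]; exact hk)]
      exact ih box st h1 h2 (fun p hp => h3 p (by simp [hp]))
        (List.nodup_cons.mp (by simpa using h4)).2 (fun p hp => h5 p (by simp [hp]))

-- A in closed intermediate form: greedy fold over the descending-sorted count values
lemma solution_eq_fold (k : Int) (tangerine : List Int) :
    solution k tangerine
      = ((PySem.List.sorted (PySem.Dict.counter tangerine).values (fun v => v) true).foldl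
          (fun st c => if st.1 < k then (st.1 + c, st.2 + 1) else st) ((0 : Int), (0 : Int))).2 := by
  simp only [solution]
  rw [count_fold_eq]
  set items0 := (PySem.Dict.counter tangerine).items with hitems0
  set sortedItems := PySem.List.sorted items0 (fun x => x.2) true with hsorted
  have hvals : PySem.List.sorted (PySem.Dict.counter tangerine).values (fun v => v) true
      = sortedItems.map Prod.snd := by
    have hv : (PySem.Dict.counter tangerine).values = items0.map Prod.snd := rfl
    rw [hv, sorted_rev_map_key items0 Prod.snd]
  have hkeysnodup : (sortedItems.map Prod.fst).Nodup := by
    have hperm : (sortedItems.map Prod.fst).Perm (items0.map Prod.fst) :=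
      (PySem.List.sorted_perm items0 (fun x => x.2) true).map Prod.fst
    refine hperm.nodup_iff.mpr ?_
    rw [hitems0, PySem.Dict.items_counter, List.map_map]
    have hid : (Prod.fst ∘ fun k => ((k : Int), ((tangerine.count k : Int)))) = id := rfl
    rw [hid, List.map_id]
    exact PySem.Set.nodup_ofList tangerine
  have hpos : ∀ p ∈ sortedItems, (1 : Int) ≤ p.2 := by
    intro p hp
    rw [hsorted, PySem.List.mem_sorted, hitems0, PySem.Dict.items_counter] at hp
    obtain ⟨x, hx, rfl⟩ := List.mem_map.mp hp
    have hmem : x ∈ tangerine := (PySem.Set.mem_ofList tangerine x).mp hx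
    show (1 : Int) ≤ (tangerine.count x : Int)
    exact_mod_cast List.count_pos_iff.mpr hmem
  have hofl : (PySem.Dict.ofList sortedItems).items = sortedItems := by
    have h := PySem.Dict.items_foldl_insert_fresh (d := (PySem.Dict.empty : PySem.Dict Int Int))
      (l := sortedItems) (k := Prod.fst) (v := Prod.snd)
      (by intro a _; rfl) hkeysnodup
    simpa [PySem.Dict.ofList, PySem.Dict.update] using h
  rw [hofl, hvals, List.foldl_map]
  exact loop_eq k sortedItems [] (0, 0) rfl rfl (by simp) hkeysnodup hpos

-- ---------- ceiling division ----------

lemma ceil_bounds {r c : Int} (hc : 0 < c) :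
    (-(PySem.Int.floordiv (-r) c) - 1) * c < r ∧ r ≤ -(PySem.Int.floordiv (-r) c) * c :=
  (PySem.Int.neg_floordiv_neg_eq_iff_of_pos hc).mp rfl

-- ---------- the greedy fold over one bucket of equal counts, in closed form ----------

lemma fold_rep_ge (k c : Int) (m : Nat) (t p : Int) (h : k ≤ t) :
    (List.replicate m c).foldl (fun st c => if st.1 < k then (st.1 + c, st.2 + 1) else st) (t, p)
      = (t, p) := by
  induction m with
  | zero => rfl
  | succ m ih =>
    rw [List.replicate_succ, List.foldl_cons, if_neg (by simp; omega)]
    exact ih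

lemma fold_rep_lt (k c : Int) (hc : 0 < c) (m : Nat) :
    ∀ t p : Int, t < k →
    (List.replicate m c).foldl (fun st c => if st.1 < k then (st.1 + c, st.2 + 1) else st) (t, p)
      = (t + min (m : Int) (-(PySem.Int.floordiv (t - k) c)) * c,
         p + min (m : Int) (-(PySem.Int.floordiv (t - k) c))) := by
  induction m with
  | zero =>
    intro t p ht
    have hq := ceil_bounds (r := k - t) hc
    rw [show -(k - t) = t - k by ring] at hq
    have hqpos : 0 ≤ -(PySem.Int.floordiv (t - k) c) := by nlinarith [hq.1, hq.2]
    simp only [List.replicate, List.foldl_nil, Nat.cast_zero]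
    rw [min_eq_left hqpos]
    simp
  | succ m ih =>
    intro t p ht
    have hq := ceil_bounds (r := k - t) hc
    rw [show -(k - t) = t - k by ring] at hq
    set q := -(PySem.Int.floordiv (t - k) c) with hqdef
    have hq1 : 1 ≤ q := by nlinarith [hq.1, hq.2]
    rw [List.replicate_succ, List.foldl_cons, if_pos (by simpa using ht)]
    by_cases h2 : t + c < k
    · have hq2 : -(PySem.Int.floordiv (t + c - k) c) = q - 1 := by
        rw [show t + c - k = -(k - t - c) by ring]
        exact (PySem.Int.neg_floordiv_neg_eq_iff_of_pos hc).mpr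
          ⟨by nlinarith [hq.1], by nlinarith [hq.2]⟩
      have hqge2 : 2 ≤ q := by nlinarith [hq.2]
      rw [ih (t + c) (p + 1) h2, hq2]
      have hmin : min ((m : Int) + 1) q = min (m : Int) (q - 1) + 1 := by omega
      rw [Prod.mk.injEq]
      push_cast
      rw [hmin]
      constructor <;> ring
    · have hone : q = 1 := by
        have h2' : k - t ≤ c := by omega
        nlinarith [hq.1, hq.2]
      rw [fold_rep_ge k c m (t + c) (p + 1) (by omega)]
      have hmin : min ((m : Int) + 1) q = 1 := by omega
      rw [Prod.mk.injEq]
      push_cast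
      rw [hmin]
      constructor <;> ring

-- ---------- B's bucket loop equals the greedy fold over the expanded bucket list ----------

lemma bucket_loop (k : Int) (mN : Int → Nat) :
    ∀ (cs : List Int), (∀ c ∈ cs, 0 < c) → ∀ t p : Int,
    cs.foldl
      (fun st c =>
        if 0 < st.1 ∧ ((mN c : Int)) ≠ 0 then
          let take := min ((mN c : Int)) (-(PySem.Int.floordiv (-st.1) c))
          (st.1 - take * c, st.2 + take)
        else st)
      (k - t, p)
    = (k - ((cs.flatMap fun c => List.replicate (mN c) c).foldl
              (fun st c => if st.1 < k then (st.1 + c, st.2 + 1) else st) (t, p)).1,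
       ((cs.flatMap fun c => List.replicate (mN c) c).foldl
              (fun st c => if st.1 < k then (st.1 + c, st.2 + 1) else st) (t, p)).2) := by
  intro cs
  induction cs with
  | nil => intro _ t p; simp
  | cons c cs ih =>
    intro hc t p
    have hcpos : 0 < c := hc c (by simp)
    have hcs : ∀ c' ∈ cs, 0 < c' := fun c' h => hc c' (by simp [h])
    simp only [List.flatMap_cons, List.foldl_append, List.foldl_cons]
    by_cases h1 : 0 < k - t
    · by_cases h2 : mN c = 0
      · rw [if_neg (by simp [h2])]
        simp only [h2, List.replicate_zero, List.foldl_nil]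
        exact ih hcs t p
      · rw [if_pos ⟨h1, by exact_mod_cast h2⟩]
        have ht : t < k := by omega
        rw [fold_rep_lt k c hcpos (mN c) t p ht]
        set T := min ((mN c : Int)) (-(PySem.Int.floordiv (t - k) c)) with hT
        have hstate : (k - t - min ((mN c : Int)) (-(PySem.Int.floordiv (-(k - t)) c)) * c,
            p + min ((mN c : Int)) (-(PySem.Int.floordiv (-(k - t)) c)))
            = (k - (t + T * c), p + T) := by
          rw [show -(k - t) = t - k by ring, ← hT, Prod.mk.injEq]
          exact ⟨by ring, rfl⟩
        show List.foldl _ (k - t - min ((mN c : Int)) (-(PySem.Int.floordiv (-(k - t)) c)) * c,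
            p + min ((mN c : Int)) (-(PySem.Int.floordiv (-(k - t)) c))) cs = _
        rw [hstate]
        exact ih hcs (t + T * c) (p + T)
    · rw [if_neg (by simp; omega)]
      rw [fold_rep_ge k c (mN c) t p (by omega)]
      exact ih hcs t p

-- ---------- the freq histogram holds the multiplicities of the count values ----------

lemma pyGetD_replicate_zero (L : Nat) (j : Nat) :
    PySem.List.pyGetD (List.replicate L (0 : Int)) (j : Int) 0 = 0 := by
  rw [PySem.List.pyGetD_natCast]
  rcases lt_or_ge j L with h | h
  · rw [List.getD_eq_getElem _ _ (by simpa using h)]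
    simp
  · rw [List.getD_eq_default _ _ (by simpa using h)]

lemma freq_spec (vs : List Int) :
    ∀ (f : List Int), (∀ v ∈ vs, 0 ≤ v ∧ v < (f.length : Int)) →
    ∀ j : Int, 0 ≤ j → j < (f.length : Int) →
    PySem.List.pyGetD
        (vs.foldl (fun fr c => PySem.List.pySetD fr c (PySem.List.pyGetD fr c 0 + 1)) f) j 0
      = PySem.List.pyGetD f j 0 + (vs.count j : Int) := by
  induction vs with
  | nil => intro f _ j _ _; simp
  | cons v vs ih =>
    intro f hv j hj0 hjL
    have hv0 : 0 ≤ v ∧ v < (f.length : Int) := hv v (by simp)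
    have hlen : (PySem.List.pySetD f v (PySem.List.pyGetD f v 0 + 1)).length = f.length :=
      PySem.List.length_pySetD f v _
    rw [List.foldl_cons,
        ih (PySem.List.pySetD f v (PySem.List.pyGetD f v 0 + 1))
          (by intro w hw; rw [hlen]; exact hv w (by simp [hw])) j hj0 (by rw [hlen]; exact hjL)]
    have hvcast : ((v.toNat : Nat) : Int) = v := by omega
    have hjcast : ((j.toNat : Nat) : Int) = j := by omega
    have hset : PySem.List.pyGetD (PySem.List.pySetD f v (PySem.List.pyGetD f v 0 + 1)) j 0
        = if j.toNat = v.toNat then PySem.List.pyGetD f v 0 + 1 else PySem.List.pyGetD f j 0 := by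
      rw [← hvcast, ← hjcast,
          PySem.List.pyGetD_pySetD_natCast f v.toNat j.toNat _ 0 (by omega)]
      rw [Int.toNat_natCast, hvcast, hjcast]
    rw [hset]
    have hcount : ((v :: vs).count j : Int) = (vs.count j : Int) + (if j.toNat = v.toNat then 1 else 0) := by
      rw [List.count_cons]
      have : (v == j) = decide (j.toNat = v.toNat) := by
        by_cases h : v = j
        · simp [h]
        · have : ¬ (j.toNat = v.toNat) := by omega
          simp [h, this]
      rw [this]
      by_cases h : j.toNat = v.toNat <;> simp [h]
    rw [hcount]
    by_cases h : j.toNat = v.toNat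
    · have : j = v := by omega
      simp only [if_true, this]
      ring
    · simp only [h, if_false]
      ring

-- ---------- the expanded bucket list is exactly the descending-sorted count values ----------

lemma flatMap_rep_pairwise (mN : Int → Nat) :
    ∀ (cs : List Int), cs.Pairwise (fun a b => b < a) →
    (cs.flatMap fun c => List.replicate (mN c) c).Pairwise (fun a b => b ≤ a) := by
  intro cs
  induction cs with
  | nil => intro _; simp
  | cons c cs ih =>
    intro h
    rw [List.pairwise_cons] at h
    rw [List.flatMap_cons, List.pairwise_append]
    refine ⟨by rw [List.pairwise_replicate]; right; exact le_refl c, ih h.2, ?_⟩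
    intro a ha b hb
    have ha' : a = c := List.eq_of_mem_replicate ha
    obtain ⟨c', hc', hb'⟩ := List.mem_flatMap.mp hb
    have hb'' : b = c' := List.eq_of_mem_replicate hb'
    have := h.1 c' hc'
    omega

lemma count_flatMap_rep (mN : Int → Nat) :
    ∀ (cs : List Int), cs.Nodup → ∀ x : Int,
    (cs.flatMap fun c => List.replicate (mN c) c).count x = if x ∈ cs then mN x else 0 := by
  intro cs
  induction cs with
  | nil => intro _ x; simp
  | cons c cs ih =>
    intro hnd x
    rw [List.nodup_cons] at hnd
    rw [List.flatMap_cons, List.count_append, List.count_replicate, ih hnd.2 x]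
    by_cases hxc : x = c
    · subst hxc
      simp [hnd.1]
    · have : (c == x) = false := by simp [Ne.symm hxc]
      simp [this, hxc]

lemma values_counter (tg : List Int) :
    (PySem.Dict.counter tg).values = (PySem.Set.ofList tg).map (fun x => ((tg.count x : Nat) : Int)) := by
  have h : (PySem.Dict.counter tg).values = (PySem.Dict.counter tg).items.map Prod.snd := rfl
  rw [h, PySem.Dict.items_counter, List.map_map]
  rfl

lemma values_mem_bounds (tg : List Int) :
    ∀ v ∈ (PySem.Dict.counter tg).values, 1 ≤ v ∧ v ≤ (tg.length : Int) := by
  rw [values_counter]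
  intro v hv
  obtain ⟨x, hx, rfl⟩ := List.mem_map.mp hv
  have hmem : x ∈ tg := (PySem.Set.mem_ofList tg x).mp hx
  constructor
  · exact_mod_cast List.count_pos_iff.mpr hmem
  · exact_mod_cast List.count_le_length (l := tg)

lemma expansion_eq_sorted (tg : List Int) :
    ((PySem.List.pyRange (tg.length : Int) 0 (-1)).flatMap
        fun c => List.replicate ((PySem.Dict.counter tg).values.count c) c)
      = PySem.List.sorted (PySem.Dict.counter tg).values (fun v => v) true := by
  set vals := (PySem.Dict.counter tg).values with hvals
  set cs := PySem.List.pyRange (tg.length : Int) 0 (-1) with hcs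
  have hnd : cs.Nodup := by
    rw [hcs, PySem.List.pyRange_neg_one_eq_reverse]
    exact List.nodup_reverse.mpr (PySem.List.nodup_pyRange_one _ _)
  have hpw : cs.Pairwise (fun a b => b < a) := by
    rw [hcs, PySem.List.pyRange_neg_one_eq_reverse, List.pairwise_reverse]
    exact PySem.List.pairwise_lt_pyRange_one _ _
  have hperm : (cs.flatMap fun c => List.replicate (vals.count c) c).Perm vals := by
    rw [List.perm_iff_count]
    intro x
    rw [count_flatMap_rep _ cs hnd x]
    by_cases hx : x ∈ cs
    · simp [hx]
    · rw [if_neg hx]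
      symm
      rw [List.count_eq_zero]
      intro hxv
      have hb := values_mem_bounds tg x hxv
      rw [hcs] at hx
      exact hx (PySem.List.mem_pyRange_neg_one.mpr ⟨by omega, by omega⟩)
  refine PySem.List.eq_of_perm_of_pairwise_le_of_injective (fun x : Int => -x) neg_injective
    (hperm.trans (PySem.List.sorted_perm vals (fun v => v) true).symm) ?_ ?_
  · exact (flatMap_rep_pairwise _ cs hpw).imp (fun h => neg_le_neg h)
  · exact (PySem.List.sorted_pairwise_rev vals (fun v => v)).imp (fun h => neg_le_neg h)

-- ---------- assembly ----------

lemma solution_eq_alt (k : Int) (tangerine : List Int) :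
    solution k tangerine = solution_alt k tangerine := by
  have hB : tangerine.foldl (fun d t => d.insert t (d.getD t 0 + 1)) PySem.Dict.empty
      = PySem.Dict.counter tangerine := by
    rw [PySem.Dict.counter_eq_foldl]; rfl
  simp only [solution_alt]
  rw [hB]
  set vals := (PySem.Dict.counter tangerine).values with hvals
  -- the built freq list answers count queries
  have hfreq : ∀ c : Int, 0 < c → c ≤ (tangerine.length : Int) →
      PySem.List.pyGetD
        (vals.foldl (fun fr c => PySem.List.pySetD fr c (PySem.List.pyGetD fr c 0 + 1))
          (List.replicate (tangerine.length + 1) (0 : Int))) c 0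
      = ((vals.count c : Nat) : Int) := by
    intro c hc0 hcn
    rw [freq_spec vals (List.replicate (tangerine.length + 1) (0 : Int))
        (by
          intro v hv
          have := values_mem_bounds tangerine v hv
          rw [List.length_replicate]
          push_cast
          omega)
        c (by omega) (by rw [List.length_replicate]; push_cast; omega)]
    rw [show c = ((c.toNat : Nat) : Int) by omega, pyGetD_replicate_zero]
    simp
  -- replace the freq lookups by count values inside the loop
  rw [PySem.List.foldl_congr_mem _ _
      (fun st c =>
        if 0 < st.1 ∧ (((vals.count c : Nat) : Int)) ≠ 0 then
          let take := min (((vals.count c : Nat) : Int)) (-(PySem.Int.floordiv (-st.1) c))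
          (st.1 - take * c, st.2 + take)
        else st)
      (k, 0)
      (by
        intro acc c hc
        have hb := PySem.List.mem_pyRange_neg_one.mp hc
        rw [hfreq c hb.1 hb.2])]
  have hb := bucket_loop k (fun c => vals.count c)
      (PySem.List.pyRange (tangerine.length : Int) 0 (-1))
      (fun c hc => (PySem.List.mem_pyRange_neg_one.mp hc).1) 0 0
  rw [sub_zero] at hb
  rw [hb, expansion_eq_sorted tangerine, ← hvals, ← solution_eq_fold]

-- ===== VERDICT (by name: the statement is the Claim_ definition above) =====
theorem solution_spec : Claim_equal_solution := by
  intro k tangerine _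
  unfold Spec_solution
  exact solution_eq_alt k tangerine
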